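-- pv_equiv track=rewrite | github.com/aysebilgegunduz/vehicle_routing_problem | vrp_v3.py | find_max_column
-- ===== SOURCE A (Python) =====
-- def find_max_column(result):
--     """
--     :param result
--     :return:maxColumn
--     define column number i have to learn from result array in terms of -1.
--     """
--     counter=0
--     maxColumn = 0
--     for i in range(len(result)):
--         if result[i] != -1:
--             counter +=1
--         elif result[i] == -1 and maxColumn < counter :
--             maxColumn = counter
--             counter=0
--         else:
--             counter = 0
--     return maxColumn
-- ===== SOURCE B (Python) =====
-- def find_max_column(result):
--     pos = [-1] + [i for i, v in enumerate(result) if v == -1]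
--     return max((pos[j] - pos[j - 1] - 1 for j in range(1, len(pos))), default=0)
-- ===== Notes on version B (the rewrite author's own statement) =====
-- stated objective: alternative
-- what changed: Replaces the running-counter/max-tracking loop with a one-pass collection of the -1 delimiter indices (with a virtual boundary at -1) followed by a maximum over consecutive-delimiter gaps.
import Mathlib
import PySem

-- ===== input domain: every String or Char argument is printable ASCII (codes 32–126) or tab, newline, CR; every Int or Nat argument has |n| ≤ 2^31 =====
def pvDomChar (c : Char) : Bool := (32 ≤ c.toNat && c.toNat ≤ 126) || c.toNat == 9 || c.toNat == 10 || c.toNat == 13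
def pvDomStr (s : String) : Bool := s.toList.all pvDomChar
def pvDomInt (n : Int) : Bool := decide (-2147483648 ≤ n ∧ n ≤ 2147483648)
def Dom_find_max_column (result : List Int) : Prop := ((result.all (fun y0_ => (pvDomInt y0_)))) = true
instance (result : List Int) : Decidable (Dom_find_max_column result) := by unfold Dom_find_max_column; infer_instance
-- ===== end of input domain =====

-- B replaces A's running-counter/max loop by collecting the -1 delimiter indices
-- (with a virtual boundary at -1) and taking the maximum consecutive gap (alternative decomposition).


-- ===== PORT A =====
-- state = (counter, maxColumn); the for-loop over the elements of result
def find_max_column (result : List Int) : Int :=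
  (result.foldl
    (fun (s : Int × Int) x =>
      if x ≠ -1 then (s.1 + 1, s.2)
      else if x = -1 ∧ s.2 < s.1 then (0, s.1)
      else (0, s.2))
    (0, 0)).2

-- ===== PORT B =====
-- pos = [-1] + [i for i,v in enumerate(result) if v == -1]
-- max of pos[j]-pos[j-1]-1 over consecutive pairs, default 0
def find_max_column_alt (result : List Int) : Int :=
  let pos : List Int :=
    (-1 : Int) :: (PySem.List.enumerate result 0).filterMap
      (fun p => if p.2 = -1 then some p.1 else none)
  ((pos.zip pos.tail).map (fun q => q.2 - q.1 - 1)).foldl max 0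

-- ===== PRECONDITION & SPEC =====
def Spec_find_max_column (result : List Int) (out : Int) : Prop := out = find_max_column_alt result
instance (result : List Int) (out : Int) : Decidable (Spec_find_max_column result out) := by unfold Spec_find_max_column; infer_instance

-- ===== CLAIM (what is proved, stated in full; the proofs are below) =====
def Claim_equal_find_max_column : Prop := ∀ (result : List Int), Dom_find_max_column result → Spec_find_max_column result (find_max_column result)

-- ===== LEMMAS AND PROOFS =====

-- lengths of the runs of non-(-1) values terminated by a -1 (trailing run excluded), c = current counter
def pvRuns : List Int → Int → List Int
  | [], _ => []
  | x :: xs, c => if x = -1 then c :: pvRuns xs 0 else pvRuns xs (c + 1)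

-- indices (as Ints, offset n) of the -1 entries
def pvPos : List Int → Int → List Int
  | [], _ => []
  | x :: xs, n => if x = -1 then n :: pvPos xs (n + 1) else pvPos xs (n + 1)

-- gaps between consecutive delimiters, previous delimiter p
def pvGaps (p : Int) : List Int → List Int
  | [] => []
  | q :: l => (q - p - 1) :: pvGaps q l

theorem pvA_runs (xs : List Int) (c m : Int) :
    (xs.foldl
      (fun (s : Int × Int) x =>
        if x ≠ -1 then (s.1 + 1, s.2)
        else if x = -1 ∧ s.2 < s.1 then (0, s.1)
        else (0, s.2))
      (c, m)).2 = (pvRuns xs c).foldl max m := by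
  induction xs generalizing c m with
  | nil => simp [pvRuns]
  | cons x xs ih =>
    simp only [List.foldl_cons]
    by_cases hx : x = -1
    · by_cases hm : m < c
      · rw [if_neg (by simp [hx]), if_pos ⟨hx, hm⟩, ih]
        simp [pvRuns, hx, max_eq_right (le_of_lt hm)]
      · rw [if_neg (by simp [hx]), if_neg (by simp [hx, hm]), ih]
        simp [pvRuns, hx, max_eq_left (le_of_not_gt hm)]
    · rw [if_pos hx, ih]
      simp [pvRuns, hx]

theorem pvGaps_runs (xs : List Int) (n p : Int) :
    pvGaps p (pvPos xs n) = pvRuns xs (n - p - 1) := by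
  induction xs generalizing n p with
  | nil => simp [pvPos, pvRuns, pvGaps]
  | cons x xs ih =>
    by_cases hx : x = -1
    · simp [pvPos, pvRuns, hx, pvGaps, ih]
    · have : n + 1 - p - 1 = (n - p - 1) + 1 := by ring
      simp [pvPos, pvRuns, hx, ih, this]

theorem pvFilterMap_pos (xs : List Int) (n : Int) :
    (PySem.List.enumerate xs n).filterMap
      (fun p => if p.2 = -1 then some p.1 else none) = pvPos xs n := by
  induction xs generalizing n with
  | nil => simp [pvPos]
  | cons x xs ih =>
    by_cases hx : x = -1 <;>
      simp [PySem.List.enumerate_cons, pvPos, hx, ih]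

theorem pvZip_gaps (l : List Int) (p : Int) :
    (((p :: l).zip l).map (fun q => q.2 - q.1 - 1)) = pvGaps p l := by
  induction l generalizing p with
  | nil => simp [pvGaps]
  | cons q l ih => simp [pvGaps, ih]

-- ===== VERDICT (by name: the statement is the Claim_ definition above) =====
theorem find_max_column_spec : Claim_equal_find_max_column := by
  intro result _
  show find_max_column result = find_max_column_alt result
  simp only [find_max_column, find_max_column_alt, pvA_runs, pvFilterMap_pos,
    List.tail_cons, pvZip_gaps, pvGaps_runs]
  norm_num
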